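-- pv_equiv track=rewrite | github.com/Zhang-Wen-chao/Computer-Systems | LeetCode/mwtr/20240824/2.py | min_cost_to_move_bottles
-- ===== SOURCE A (Python) =====
-- def min_cost_to_move_bottles(a, b, c, d, bottles):
--     total_cost = 0
--     current_x, current_y = a, b
--
--     for xi, yi in bottles:
--         # 移动到瓶子的位置
--         move_to_bottle = abs(current_x - xi) + abs(current_y - yi)
--         # 再将瓶子移动到目标位置
--         move_to_target = abs(xi - c) + abs(yi - d)
--         # 总代价
--         total_cost += move_to_bottle + move_to_target
--         # 更新当前坐标为目标位置
--         current_x, current_y = c, d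
--
--     return total_cost
-- ===== SOURCE B (Python) =====
-- def min_cost_to_move_bottles(a, b, c, d, bottles):
--     if not bottles:
--         return 0
--     x0, y0 = bottles[0]
--     total = 2 * sum(abs(x - c) + abs(y - d) for x, y in bottles)
--     return total - (abs(x0 - c) + abs(y0 - d)) + abs(a - x0) + abs(b - y0)
-- ===== Notes on version B (the rewrite author's own statement) =====
-- stated objective: simpler
-- what changed: Replaced the stateful loop that tracks the current position with a closed-form aggregate: twice the sum of each bottle's target distance, corrected once for the first bottle (subtract its target distance, add the start-to-first-bottle distance).
import Mathlib
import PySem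

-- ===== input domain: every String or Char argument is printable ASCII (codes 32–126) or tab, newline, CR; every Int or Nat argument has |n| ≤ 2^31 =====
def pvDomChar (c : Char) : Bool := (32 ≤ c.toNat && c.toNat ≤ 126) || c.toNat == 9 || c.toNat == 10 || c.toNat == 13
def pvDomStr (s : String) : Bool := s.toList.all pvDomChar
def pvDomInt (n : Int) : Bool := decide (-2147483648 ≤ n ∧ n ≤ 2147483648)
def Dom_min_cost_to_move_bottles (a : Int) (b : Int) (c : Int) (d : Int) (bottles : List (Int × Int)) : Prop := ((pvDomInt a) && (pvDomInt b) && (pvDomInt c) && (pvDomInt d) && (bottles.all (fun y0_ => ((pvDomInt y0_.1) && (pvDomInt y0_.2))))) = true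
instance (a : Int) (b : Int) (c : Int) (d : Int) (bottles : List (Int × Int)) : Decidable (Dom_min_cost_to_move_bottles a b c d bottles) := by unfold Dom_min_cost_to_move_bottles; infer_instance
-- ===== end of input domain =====

-- B replaces A's stateful position-tracking loop by a closed-form aggregate (2 * sum of
-- target distances, with a correction term for the first bottle); objective: simpler.
-- ===== PORT A =====
-- A: loop over bottles keeping (total_cost, current_x, current_y); after each bottle the
-- current position becomes the target (c, d).
def min_cost_to_move_bottles (a : Int) (b : Int) (c : Int) (d : Int) (bottles : List (Int × Int)) : Int :=
  (bottles.foldl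
    (fun (s : Int × Int × Int) (p : Int × Int) =>
      let moveToBottle := |s.2.1 - p.1| + |s.2.2 - p.2|
      let moveToTarget := |p.1 - c| + |p.2 - d|
      (s.1 + (moveToBottle + moveToTarget), c, d))
    (0, a, b)).1

-- ===== PORT B =====
-- B: 2 * sum of each bottle's target distance, minus the first bottle's target distance,
-- plus the start-to-first-bottle distance; 0 for no bottles.
def min_cost_to_move_bottles_alt (a : Int) (b : Int) (c : Int) (d : Int) (bottles : List (Int × Int)) : Int :=
  match bottles with
  | [] => 0
  | (x0, y0) :: _ =>
    let total := 2 * (bottles.map (fun p => |p.1 - c| + |p.2 - d|)).sum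
    total - (|x0 - c| + |y0 - d|) + |a - x0| + |b - y0|

-- ===== PRECONDITION & SPEC =====
def Spec_min_cost_to_move_bottles (a : Int) (b : Int) (c : Int) (d : Int) (bottles : List (Int × Int)) (out : Int) : Prop := out = min_cost_to_move_bottles_alt a b c d bottles
instance (a : Int) (b : Int) (c : Int) (d : Int) (bottles : List (Int × Int)) (out : Int) : Decidable (Spec_min_cost_to_move_bottles a b c d bottles out) := by unfold Spec_min_cost_to_move_bottles; infer_instance

-- ===== CLAIM (what is proved, stated in full; the proofs are below) =====
def Claim_equal_min_cost_to_move_bottles : Prop := ∀ (a : Int) (b : Int) (c : Int) (d : Int) (bottles : List (Int × Int)), Dom_min_cost_to_move_bottles a b c d bottles → Spec_min_cost_to_move_bottles a b c d bottles (min_cost_to_move_bottles a b c d bottles)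

-- ===== LEMMAS AND PROOFS =====

-- From state (t, c, d) the loop adds twice each remaining bottle's target distance.
theorem foldl_from_target (c d : Int) (l : List (Int × Int)) : ∀ (t : Int),
    (l.foldl
      (fun (s : Int × Int × Int) (p : Int × Int) =>
        let moveToBottle := |s.2.1 - p.1| + |s.2.2 - p.2|
        let moveToTarget := |p.1 - c| + |p.2 - d|
        (s.1 + (moveToBottle + moveToTarget), c, d))
      (t, c, d)).1 = t + 2 * (l.map (fun p => |p.1 - c| + |p.2 - d|)).sum := by
  induction l with
  | nil => intro t; simp
  | cons p rest ih =>
    intro t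
    simp only [List.foldl_cons, List.map_cons, List.sum_cons, ih]
    simp only [abs_sub_comm c p.1, abs_sub_comm d p.2]
    ring

-- ===== VERDICT (by name: the statement is the Claim_ definition above) =====
theorem min_cost_to_move_bottles_spec : Claim_equal_min_cost_to_move_bottles := by
  intro a b c d bottles _
  unfold Spec_min_cost_to_move_bottles min_cost_to_move_bottles min_cost_to_move_bottles_alt
  match bottles with
  | [] => simp
  | (x0, y0) :: rest =>
    simp only [List.foldl_cons, foldl_from_target, List.map_cons, List.sum_cons]
    ring
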